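-- pv_equiv track=rewrite | github.com/bshello/Algo | 백준/Silver/20529. 가장 가까운 세 사람의 심리적 거리/가장 가까운 세 사람의 심리적 거리.py | opr
-- ===== SOURCE A (Python) =====
-- def opr(a, b, c):
--
--     tmp = 0
--     for i in range(4):
--         if a[i] != b[i]:
--             tmp += 1
--         if a[i] != c[i]:
--             tmp += 1
--         if b[i] != c[i]:
--             tmp += 1
--
--     return tmp
-- ===== SOURCE B (Python) =====
-- def opr(a, b, c):
--     total = 0
--     for i in range(4):
--         total += [0, 0, 2, 3][len({a[i], b[i], c[i]})]
--     return total
-- ===== Notes on version B (the rewrite author's own statement) =====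
-- stated objective: simpler
-- what changed: Replaces the three explicit pairwise comparisons per position with a single distinct-count set lookup: the mismatching-pair count among three chars is [0,0,2,3][number of distinct chars].
import Mathlib
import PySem

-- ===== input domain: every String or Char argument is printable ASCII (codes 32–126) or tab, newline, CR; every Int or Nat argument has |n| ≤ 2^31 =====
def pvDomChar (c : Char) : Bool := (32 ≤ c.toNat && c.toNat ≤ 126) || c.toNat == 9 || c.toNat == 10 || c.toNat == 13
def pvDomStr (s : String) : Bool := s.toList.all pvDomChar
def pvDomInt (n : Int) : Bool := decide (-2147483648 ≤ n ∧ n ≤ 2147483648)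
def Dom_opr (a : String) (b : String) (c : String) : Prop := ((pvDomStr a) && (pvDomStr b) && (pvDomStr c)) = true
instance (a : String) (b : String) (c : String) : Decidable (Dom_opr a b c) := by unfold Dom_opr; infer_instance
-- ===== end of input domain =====

-- B replaces the three pairwise comparisons per position with one distinct-count table lookup (objective: simpler).

-- ===== PORT A =====
def opr (a : String) (b : String) (c : String) : Int :=
  (PySem.List.pyRange 0 4 1).foldl (fun tmp i =>
    let tmp := if PySem.List.pyGetD a.toList i ' ' ≠ PySem.List.pyGetD b.toList i ' ' then tmp + 1 else tmp
    let tmp := if PySem.List.pyGetD a.toList i ' ' ≠ PySem.List.pyGetD c.toList i ' ' then tmp + 1 else tmp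
    if PySem.List.pyGetD b.toList i ' ' ≠ PySem.List.pyGetD c.toList i ' ' then tmp + 1 else tmp) 0

-- ===== PORT B =====
def opr_alt (a : String) (b : String) (c : String) : Int :=
  (PySem.List.pyRange 0 4 1).foldl (fun total i =>
    total + PySem.List.pyGetD ([0, 0, 2, 3] : List Int)
      ((PySem.Set.ofList [PySem.List.pyGetD a.toList i ' ',
                          PySem.List.pyGetD b.toList i ' ',
                          PySem.List.pyGetD c.toList i ' ']).length : Int) 0) 0

-- ===== PRECONDITION & SPEC =====
-- Pre_ excludes exactly the inputs where Python's a[i]/b[i]/c[i] raises IndexError: some string shorter than 4.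
def Pre_opr (a : String) (b : String) (c : String) : Prop :=
  4 ≤ a.toList.length ∧ 4 ≤ b.toList.length ∧ 4 ≤ c.toList.length
instance (a : String) (b : String) (c : String) : Decidable (Pre_opr a b c) := by unfold Pre_opr; infer_instance
def pvWitness_opr : String × String × String := ("abcd", "abce", "xbcd")

def Spec_opr (a : String) (b : String) (c : String) (out : Int) : Prop := out = opr_alt a b c
instance (a : String) (b : String) (c : String) (out : Int) : Decidable (Spec_opr a b c out) := by unfold Spec_opr; infer_instance

-- ===== CLAIM (what is proved, stated in full; the proofs are below) =====
def Claim_equal_opr : Prop := ∀ (a : String) (b : String) (c : String), Dom_opr a b c → Pre_opr a b c → Spec_opr a b c (opr a b c)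

-- ===== LEMMAS AND PROOFS =====

theorem exists_four {α : Type} (l : List α) (h : 4 ≤ l.length) :
    ∃ x0 x1 x2 x3 t, l = x0 :: x1 :: x2 :: x3 :: t := by
  match l with
  | x0 :: x1 :: x2 :: x3 :: t => exact ⟨x0, x1, x2, x3, t, rfl⟩
  | [] | [_] | [_,_] | [_,_,_] => simp at h

-- per position: A's if-chain adds the distinct-count table entry for the three chars
theorem pos_step (t : Int) (x y z : Char) :
    (if y ≠ z then
       (if x ≠ z then (if x ≠ y then t + 1 else t) + 1 else (if x ≠ y then t + 1 else t)) + 1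
     else
       (if x ≠ z then (if x ≠ y then t + 1 else t) + 1 else (if x ≠ y then t + 1 else t)))
    = t + PySem.List.pyGetD ([0, 0, 2, 3] : List Int)
        ((PySem.Set.ofList [x, y, z]).length : Int) 0 := by
  by_cases h1 : x = y <;> by_cases h2 : x = z <;> by_cases h3 : y = z <;>
    simp_all [PySem.Set.ofList, PySem.Set.add, PySem.List.pyGetD, PySem.List.pyGet?,
      PySem.List.pyIdx?, eq_comm] <;> omega

theorem opr_spec : Claim_equal_opr := by
  intro a b c _ hpre
  unfold Spec_opr opr opr_alt
  obtain ⟨ha, hb, hc⟩ := hpre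
  obtain ⟨x0, x1, x2, x3, xt, hx⟩ := exists_four a.toList ha
  obtain ⟨y0, y1, y2, y3, yt, hy⟩ := exists_four b.toList hb
  obtain ⟨z0, z1, z2, z3, zt, hz⟩ := exists_four c.toList hc
  rw [hx, hy, hz]
  rw [show PySem.List.pyRange 0 4 1 = [0, 1, 2, 3] from rfl]
  simp only [List.foldl]
  simp only [show PySem.List.pyGetD (x0 :: x1 :: x2 :: x3 :: xt) (0 : Int) ' ' = x0 from by simp [pysem],
    show PySem.List.pyGetD (x0 :: x1 :: x2 :: x3 :: xt) (1 : Int) ' ' = x1 from by simp [pysem],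
    show PySem.List.pyGetD (x0 :: x1 :: x2 :: x3 :: xt) (2 : Int) ' ' = x2 from by simp [pysem],
    show PySem.List.pyGetD (x0 :: x1 :: x2 :: x3 :: xt) (3 : Int) ' ' = x3 from by simp [pysem],
    show PySem.List.pyGetD (y0 :: y1 :: y2 :: y3 :: yt) (0 : Int) ' ' = y0 from by simp [pysem],
    show PySem.List.pyGetD (y0 :: y1 :: y2 :: y3 :: yt) (1 : Int) ' ' = y1 from by simp [pysem],
    show PySem.List.pyGetD (y0 :: y1 :: y2 :: y3 :: yt) (2 : Int) ' ' = y2 from by simp [pysem],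
    show PySem.List.pyGetD (y0 :: y1 :: y2 :: y3 :: yt) (3 : Int) ' ' = y3 from by simp [pysem],
    show PySem.List.pyGetD (z0 :: z1 :: z2 :: z3 :: zt) (0 : Int) ' ' = z0 from by simp [pysem],
    show PySem.List.pyGetD (z0 :: z1 :: z2 :: z3 :: zt) (1 : Int) ' ' = z1 from by simp [pysem],
    show PySem.List.pyGetD (z0 :: z1 :: z2 :: z3 :: zt) (2 : Int) ' ' = z2 from by simp [pysem],
    show PySem.List.pyGetD (z0 :: z1 :: z2 :: z3 :: zt) (3 : Int) ' ' = z3 from by simp [pysem]]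
  rw [pos_step, pos_step, pos_step, pos_step]
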